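-- pv_equiv track=rewrite | github.com/SohaFarhana05/Recursion_Codeforces | F.py | f
-- ===== SOURCE A (Python) =====
-- def f(i,arr):
--     if i<0:
--         return ''
--     elif i==0:
--         return str(arr[0])
--     elif i%2==0:
--         return str(arr[i]) + ' ' + f(i-2,arr)
--     else:
--         return f(i-1,arr)
-- ===== SOURCE B (Python) =====
-- def f(i, arr):
--     if i < 0:
--         return ''
--     start = i if i % 2 == 0 else i - 1
--     parts = []
--     for j in range(start, -1, -2):
--         parts.append(str(arr[j]))
--     return ' '.join(parts)
-- ===== Notes on version B (the rewrite author's own statement) =====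
-- stated objective: simpler
-- what changed: Replaced the descending recursion (with an extra no-op recursive call on odd i) by a single explicit loop over range(start, -1, -2) that collects the pieces and joins them with ' '.
import Mathlib
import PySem

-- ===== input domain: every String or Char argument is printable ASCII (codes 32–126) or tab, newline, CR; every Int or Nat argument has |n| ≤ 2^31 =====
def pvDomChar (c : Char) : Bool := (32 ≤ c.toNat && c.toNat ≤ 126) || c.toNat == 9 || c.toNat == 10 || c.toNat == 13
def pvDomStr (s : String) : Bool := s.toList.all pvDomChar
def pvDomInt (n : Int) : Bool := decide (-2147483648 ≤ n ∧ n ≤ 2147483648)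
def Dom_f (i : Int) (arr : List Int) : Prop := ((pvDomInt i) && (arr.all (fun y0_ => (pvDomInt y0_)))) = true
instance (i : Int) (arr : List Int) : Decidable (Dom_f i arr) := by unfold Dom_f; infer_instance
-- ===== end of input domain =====

-- B replaces A's descending recursion by one explicit loop over range(start, -1, -2) plus ' '.join (objective: simpler).

-- ===== PORT A =====
def f (i : Int) (arr : List Int) : String :=
  if i < 0 then ""
  else if i = 0 then PySem.Int.toStr (PySem.List.pyGetD arr 0 0)
  else if PySem.Int.mod i 2 = 0 then
    PySem.Int.toStr (PySem.List.pyGetD arr i 0) ++ " " ++ f (i - 2) arr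
  else f (i - 1) arr
termination_by i.toNat
decreasing_by all_goals (simp_wf; omega)

-- ===== PORT B =====
def f_alt (i : Int) (arr : List Int) : String :=
  if i < 0 then ""
  else
    let start := if PySem.Int.mod i 2 = 0 then i else i - 1
    let parts := (PySem.List.pyRange start (-1) (-2)).foldl
      (fun parts j => parts ++ [PySem.Int.toStr (PySem.List.pyGetD arr j 0)]) []
    PySem.Str.join " " parts

-- ===== PRECONDITION & SPEC =====
-- Pre_f excludes exactly the inputs where A raises IndexError: 0 ≤ i whose even start index i - i%2 is not below arr's length.
def Pre_f (i : Int) (arr : List Int) : Prop :=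
  i < 0 ∨ i - PySem.Int.mod i 2 < (arr.length : Int)
instance (i : Int) (arr : List Int) : Decidable (Pre_f i arr) := by unfold Pre_f; infer_instance
def pvWitness_f : Int × List Int := (5, [10, -3, 7, 0, 42])

def Spec_f (i : Int) (arr : List Int) (out : String) : Prop := out = f_alt i arr
instance (i : Int) (arr : List Int) (out : String) : Decidable (Spec_f i arr out) := by unfold Spec_f; infer_instance

-- ===== CLAIM (what is proved, stated in full; the proofs are below) =====
def Claim_equal_f : Prop := ∀ (i : Int) (arr : List Int), Dom_f i arr → Pre_f i arr → Spec_f i arr (f i arr)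

-- ===== LEMMAS AND PROOFS =====

-- range(a, -1, -2) as a cons, for 0 ≤ a (no PySem lemma covers step -2)
lemma pyRange_step2_cons (a : Int) (h : 0 ≤ a) :
    PySem.List.pyRange a (-1) (-2) = a :: PySem.List.pyRange (a - 2) (-1) (-2) := by
  simp only [PySem.List.pyRange]
  norm_num
  by_cases h2 : 2 < 1 + a
  · rw [if_pos (by omega), if_pos h2]
    have hc : ((a + 1 + 2 - 1) / 2).toNat = ((a - 2 + 1 + 2 - 1) / 2).toNat + 1 := by omega
    rw [hc, List.range_succ_eq_map]
    simp [List.map_map, Function.comp]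
    intro k _
    ring
  · rw [if_pos (by omega), if_neg h2]
    have ha : a = 0 ∨ a = 1 := by omega
    rcases ha with rfl | rfl <;> decide

lemma pyRange_step2_nil (a : Int) (h : a < 0) :
    PySem.List.pyRange a (-1) (-2) = [] := by
  simp only [PySem.List.pyRange]
  norm_num
  intro h2
  omega

-- ' '.join over a cons of a nonempty list is head ++ " " ++ join of the tail
lemma str_join_cons_cons (x y : String) (l : List String) :
    PySem.Str.join " " (x :: y :: l) = x ++ " " ++ PySem.Str.join " " (y :: l) := by
  apply String.toList_inj.mp
  simp [PySem.Str.toList_join, PySem.Chars.join, String.toList_append, List.intercalate]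

lemma str_join_singleton (x : String) : PySem.Str.join " " [x] = x := by
  apply String.toList_inj.mp
  simp [PySem.Str.toList_join, PySem.Chars.join, List.intercalate]

-- f_alt on a nonnegative input, written as a join over the mapped range
lemma f_alt_eq_join (i : Int) (arr : List Int) (h : 0 ≤ i) :
    f_alt i arr = PySem.Str.join " "
      (((PySem.List.pyRange (if PySem.Int.mod i 2 = 0 then i else i - 1) (-1) (-2))).map
        (fun j => PySem.Int.toStr (PySem.List.pyGetD arr j 0))) := by
  unfold f_alt
  rw [if_neg (by omega)]
  simp only [PySem.List.foldl_append_singleton_eq_map, List.nil_append]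

lemma f_eq_f_alt (i : Int) (arr : List Int) : f i arr = f_alt i arr := by
  suffices H : ∀ (n : Nat) (i : Int), i.toNat = n → f i arr = f_alt i arr from H _ i rfl
  intro n
  induction n using Nat.strong_induction_on with
  | _ n ih =>
    intro i hi
    by_cases hneg : i < 0
    · rw [f, f_alt, if_pos hneg, if_pos hneg]
    · have h0 : 0 ≤ i := by omega
      have hmod : PySem.Int.mod i 2 = i % 2 := PySem.Int.mod_eq_emod_of_pos (by norm_num)
      by_cases hz : i = 0
      · subst hz
        rw [f, f_alt_eq_join 0 arr le_rfl]
        norm_num [pyRange_step2_cons 0 le_rfl, pyRange_step2_nil (-2) (by norm_num),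
          str_join_singleton]
      · by_cases hev : PySem.Int.mod i 2 = 0
        · -- even i ≥ 2
          have h2 : 2 ≤ i := by omega
          rw [f, if_neg hneg, if_neg hz, if_pos hev,
            ih (i - 2).toNat (by omega) (i - 2) rfl,
            f_alt_eq_join i arr h0, if_pos hev,
            f_alt_eq_join (i - 2) arr (by omega),
            if_pos (by rw [PySem.Int.mod_eq_emod_of_pos (by norm_num)]; omega),
            pyRange_step2_cons i h0,
            pyRange_step2_cons (i - 2) (by omega)]
          simp only [List.map_cons, str_join_cons_cons]
        · -- odd i ≥ 1
          have h1 : 1 ≤ i := by omega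
          rw [f, if_neg hneg, if_neg hz, if_neg hev,
            ih (i - 1).toNat (by omega) (i - 1) rfl,
            f_alt_eq_join i arr h0, if_neg hev,
            f_alt_eq_join (i - 1) arr (by omega),
            if_pos (by rw [PySem.Int.mod_eq_emod_of_pos (by norm_num)]; omega)]

-- ===== VERDICT (by name: the statement is the Claim_ definition above) =====
theorem f_spec : Claim_equal_f := by
  intro i arr _ _
  unfold Spec_f
  exact f_eq_f_alt i arr
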